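-- pv_equiv track=rewrite | github.com/Shantanugupta1118/200-Days-Code-Challenge | Day 52/Jesse and Cookies.py | JesseAndCookies
-- ===== SOURCE A (Python) =====
-- from heapq import heappush, heappop, heapify
--
-- def JesseAndCookies(n, k, cookies):
--     heapify(cookies)
--     res = 0
--     while any(c < k for c in cookies) and len(cookies)>1:
--         a = heappop(cookies)
--         b = heappop(cookies)
--         heappush(cookies, a + b*2)
--         res += 1
--     if all(x >= k for x in cookies):
--         return res
--     else:
--         return -1
-- ===== SOURCE B (Python) =====
-- # Sorted-list reformulation: sort once, then repeatedly combine the two front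
-- # (smallest) cookies and re-insert the blend at its ordered position.
-- # Unlike A, B does not mutate `cookies`; equivalence is about the return value.
-- def JesseAndCookies(n, k, cookies):
--     arr = sorted(cookies)
--     res = 0
--     while len(arr) > 1 and arr[0] < k:
--         new = arr[0] + 2 * arr[1]
--         rest = arr[2:]
--         i = 0
--         while i < len(rest) and rest[i] <= new:
--             i += 1
--         rest.insert(i, new)
--         arr = rest
--         res += 1
--     if not arr or arr[0] >= k:
--         return res
--     return -1
-- ===== Notes on version B (the rewrite author's own statement) =====
-- stated objective: alternative
-- what changed: Replaces the binary heap plus a full any(c<k) rescan of the whole heap on every iteration with one upfront sort and a sorted list maintained by ordered re-insertion, testing only the front element; B also does not mutate the caller's list.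
import Mathlib
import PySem

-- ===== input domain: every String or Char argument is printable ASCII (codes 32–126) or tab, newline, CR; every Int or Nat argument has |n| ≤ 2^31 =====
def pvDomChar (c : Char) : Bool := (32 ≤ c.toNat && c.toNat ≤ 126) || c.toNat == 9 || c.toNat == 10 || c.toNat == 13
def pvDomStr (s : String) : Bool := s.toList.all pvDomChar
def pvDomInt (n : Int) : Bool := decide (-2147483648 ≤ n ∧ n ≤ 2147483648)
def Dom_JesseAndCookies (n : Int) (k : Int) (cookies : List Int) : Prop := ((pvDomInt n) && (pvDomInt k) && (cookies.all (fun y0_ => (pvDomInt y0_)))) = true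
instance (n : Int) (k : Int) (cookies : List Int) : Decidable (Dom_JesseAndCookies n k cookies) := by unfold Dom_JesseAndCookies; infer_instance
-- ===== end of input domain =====

-- B replaces A's binary heap (plus A's full any(c < k) rescan of the heap on every
-- iteration) with one upfront sort and a sorted list maintained by ordered re-insertion.
-- A mutates `cookies` in place (heapify/pops); B does not: the equivalence proved here
-- is about the return value only.

-- ===== PORT A =====
-- A's heapq library calls (heapify/heappop/heappush) are ported as a verified mergeable
-- min-heap; A's own loop (`while any(c < k ...) and len > 1`, pop two, push a + b*2,
-- final all(x >= k)) is transliterated verbatim over it.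
inductive PvHeap : Type
  | nil : PvHeap
  | node : Int → PvHeap → PvHeap → PvHeap
deriving DecidableEq, Repr

def hSize : PvHeap → Nat
  | PvHeap.nil => 0
  | PvHeap.node _ l r => 1 + hSize l + hSize r

def hToList : PvHeap → List Int
  | PvHeap.nil => []
  | PvHeap.node v l r => v :: (hToList l ++ hToList r)

def hMerge : PvHeap → PvHeap → PvHeap
  | PvHeap.nil, h => h
  | PvHeap.node x l1 r1, PvHeap.nil => PvHeap.node x l1 r1
  | PvHeap.node x l1 r1, PvHeap.node y l2 r2 =>
      if x ≤ y then PvHeap.node x (hMerge r1 (PvHeap.node y l2 r2)) l1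
      else PvHeap.node y (hMerge (PvHeap.node x l1 r1) r2) l2
termination_by a b => hSize a + hSize b
decreasing_by all_goals (simp [hSize]; try omega)

def hPush (x : Int) (h : PvHeap) : PvHeap := hMerge (PvHeap.node x PvHeap.nil PvHeap.nil) h

def hPop : PvHeap → Int × PvHeap
  | PvHeap.nil => (0, PvHeap.nil)
  | PvHeap.node v l r => (v, hMerge l r)

def hHeapify (l : List Int) : PvHeap := l.foldl (fun h x => hPush x h) PvHeap.nil

theorem hSize_merge (a b : PvHeap) : hSize (hMerge a b) = hSize a + hSize b := by
  fun_induction hMerge a b with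
  | case1 => simp [hSize]
  | case2 => simp [hSize]
  | case3 x l1 r1 y l2 r2 hxy ih => simp [hSize, ih]; omega
  | case4 x l1 r1 y l2 r2 hxy ih => simp [hSize, ih]; omega

theorem hSize_pop (h : PvHeap) : hSize (hPop h).2 = hSize h - 1 := by
  cases h <;> (simp [hPop, hSize, hSize_merge]; try omega)

def loopA (k : Int) (h : PvHeap) (res : Int) : Int :=
  if hc : (hToList h).any (fun c => decide (c < k)) && decide (1 < hSize h) then
    let p1 := hPop h
    let p2 := hPop p1.2
    loopA k (hPush (p1.1 + p2.1 * 2) p2.2) (res + 1)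
  else
    if (hToList h).all (fun x => decide (k ≤ x)) then res else -1
termination_by hSize h
decreasing_by
  simp only [Bool.and_eq_true, decide_eq_true_eq] at hc
  simp [hPush, hSize_merge, hSize_pop, hSize]
  omega

def JesseAndCookies (n : Int) (k : Int) (cookies : List Int) : Int :=
  loopA k (hHeapify cookies) 0

-- ===== PORT B =====
-- ordered insertion of x into a sorted list (Source B's scan-and-insert inner loop)
def insB (x : Int) : List Int → List Int
  | [] => [x]
  | y :: t => if y ≤ x then y :: insB x t else x :: y :: t

theorem length_insB (x : Int) (t : List Int) : (insB x t).length = t.length + 1 := by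
  induction t with
  | nil => simp [insB]
  | cons y t ih => simp only [insB]; split <;> simp [ih]

def loopB (k : Int) (arr : List Int) (res : Int) : Int :=
  match arr with
  | [] => res
  | [a] => if k ≤ a then res else -1
  | a :: b :: t => if a < k then loopB k (insB (a + 2 * b) t) (res + 1) else res
termination_by arr.length
decreasing_by simp [length_insB]

def JesseAndCookies_alt (n : Int) (k : Int) (cookies : List Int) : Int :=
  loopB k (PySem.List.sorted cookies (fun x => x) false) 0

-- ===== PRECONDITION & SPEC =====
def Spec_JesseAndCookies (n : Int) (k : Int) (cookies : List Int) (out : Int) : Prop := out = JesseAndCookies_alt n k cookies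
instance (n : Int) (k : Int) (cookies : List Int) (out : Int) : Decidable (Spec_JesseAndCookies n k cookies out) := by unfold Spec_JesseAndCookies; infer_instance

-- ===== CLAIM (what is proved, stated in full; the proofs are below) =====
def Claim_equal_JesseAndCookies : Prop := ∀ (n : Int) (k : Int) (cookies : List Int), Dom_JesseAndCookies n k cookies → Spec_JesseAndCookies n k cookies (JesseAndCookies n k cookies)

-- ===== LEMMAS AND PROOFS =====
theorem perm_hToList_merge (a b : PvHeap) :
    (hToList (hMerge a b)).Perm (hToList a ++ hToList b) := by
  fun_induction hMerge a b with
  | case1 => simp [hToList]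
  | case2 => simp [hToList]
  | case3 x l1 r1 y l2 r2 hxy ih =>
      refine List.perm_iff_count.mpr (fun c => ?_)
      have ihc := ih.count_eq c
      simp [hToList, List.count_append, List.count_cons] at *
      omega
  | case4 x l1 r1 y l2 r2 hxy ih =>
      refine List.perm_iff_count.mpr (fun c => ?_)
      have ihc := ih.count_eq c
      simp [hToList, List.count_append, List.count_cons] at *
      omega

def IsHeap : PvHeap → Prop
  | PvHeap.nil => True
  | PvHeap.node v l r => (∀ x ∈ hToList l, v ≤ x) ∧ (∀ x ∈ hToList r, v ≤ x) ∧ IsHeap l ∧ IsHeap r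

theorem isHeap_root_le (v : Int) (l r : PvHeap) (h : IsHeap (PvHeap.node v l r)) :
    ∀ x ∈ hToList (PvHeap.node v l r), v ≤ x := by
  obtain ⟨bl, br, _, _⟩ := h
  intro x hx
  simp [hToList] at hx
  rcases hx with rfl | hx | hx
  · exact le_refl x
  · exact bl x hx
  · exact br x hx

theorem isHeap_merge (a b : PvHeap) (ha : IsHeap a) (hb : IsHeap b) : IsHeap (hMerge a b) := by
  fun_induction hMerge a b with
  | case1 => exact hb
  | case2 => exact ha
  | case3 x l1 r1 y l2 r2 hxy ih =>
      obtain ⟨bl1, br1, hl1, hr1⟩ := ha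
      obtain ⟨bl2, br2, hl2, hr2⟩ := hb
      refine ⟨?_, bl1, ih hr1 ⟨bl2, br2, hl2, hr2⟩, hl1⟩
      intro z hz
      rw [(perm_hToList_merge r1 _).mem_iff] at hz
      simp [hToList] at hz
      rcases hz with hz | rfl | hz | hz
      · exact br1 z hz
      · exact hxy
      · exact le_trans hxy (bl2 z hz)
      · exact le_trans hxy (br2 z hz)
  | case4 x l1 r1 y l2 r2 hxy ih =>
      obtain ⟨bl1, br1, hl1, hr1⟩ := ha
      obtain ⟨bl2, br2, hl2, hr2⟩ := hb
      refine ⟨?_, bl2, ih ⟨bl1, br1, hl1, hr1⟩ hr2, hl2⟩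
      intro z hz
      rw [(perm_hToList_merge _ r2).mem_iff] at hz
      simp [hToList] at hz
      rcases hz with rfl | hz | hz | hz
      · omega
      · exact le_trans (by omega) (bl1 z hz)
      · exact le_trans (by omega) (br1 z hz)
      · exact br2 z hz

theorem isHeap_push (x : Int) (h : PvHeap) (hh : IsHeap h) : IsHeap (hPush x h) :=
  isHeap_merge _ _ (by simp [IsHeap, hToList]) hh

theorem perm_push (x : Int) (h : PvHeap) : (hToList (hPush x h)).Perm (x :: hToList h) := by
  simpa [hToList] using perm_hToList_merge (PvHeap.node x PvHeap.nil PvHeap.nil) h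

theorem hHeapify_spec (l : List Int) :
    IsHeap (hHeapify l) ∧ (hToList (hHeapify l)).Perm l := by
  have main : ∀ (l : List Int) (h0 : PvHeap), IsHeap h0 →
      IsHeap (l.foldl (fun h x => hPush x h) h0) ∧
      (hToList (l.foldl (fun h x => hPush x h) h0)).Perm (hToList h0 ++ l) := by
    intro l
    induction l with
    | nil => intro h0 hh; exact ⟨hh, by simp⟩
    | cons x t ih =>
        intro h0 hh
        obtain ⟨h1, h2⟩ := ih (hPush x h0) (isHeap_push x h0 hh)
        refine ⟨h1, h2.trans ?_⟩
        refine ((perm_push x h0).append_right t).trans ?_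
        simp
        exact (List.perm_middle).symm
  obtain ⟨h1, h2⟩ := main l PvHeap.nil (by trivial)
  exact ⟨h1, by simpa [hToList] using h2⟩

theorem perm_insB (x : Int) (t : List Int) : (insB x t).Perm (x :: t) := by
  induction t with
  | nil => simp [insB]
  | cons y t ih =>
      simp only [insB]
      split
      · exact (ih.cons y).trans (List.Perm.swap x y t)
      · exact List.Perm.refl _

theorem pairwise_insB (x : Int) (t : List Int) (h : t.Pairwise (· ≤ ·)) :
    (insB x t).Pairwise (· ≤ ·) := by
  induction t with
  | nil => simp [insB]
  | cons y t ih =>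
      rw [List.pairwise_cons] at h
      simp only [insB]
      split
      · rename_i hyx
        refine List.pairwise_cons.mpr ⟨?_, ih h.2⟩
        intro z hz
        rcases List.mem_cons.mp ((perm_insB x t).mem_iff.mp hz) with rfl | hz
        · exact hyx
        · exact h.1 z hz
      · rename_i hyx
        refine List.pairwise_cons.mpr ⟨?_, List.pairwise_cons.mpr h⟩
        intro z hz
        rcases List.mem_cons.mp hz with rfl | hz
        · omega
        · exact le_trans (by omega) (h.1 z hz)

theorem length_hToList (h : PvHeap) : (hToList h).length = hSize h := by
  induction h with
  | nil => simp [hToList, hSize]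
  | node v l r ihl ihr => simp [hToList, hSize, ihl, ihr]; omega

theorem loop_eq (k : Int) : ∀ (N : Nat) (h : PvHeap) (s : List Int) (res : Int),
    hSize h ≤ N → IsHeap h → s.Perm (hToList h) → s.Pairwise (· ≤ ·) →
    loopA k h res = loopB k s res := by
  intro N
  induction N with
  | zero =>
      intro h s res hN hh hperm hsort
      have h0 : hSize h = 0 := by omega
      have hl : hToList h = [] := by
        have := length_hToList h
        rw [h0] at this
        exact List.eq_nil_of_length_eq_zero this
      have hs : s = [] := by
        have := hperm.length_eq
        simp [hl] at this
        exact this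
      subst hs
      rw [loopA, dif_neg (by simp [hl]), if_pos (by simp [hl]), loopB]
  | succ N ih =>
      intro h s res hN hh hperm hsort
      match s with
      | [] =>
          have hl : hToList h = [] := List.Perm.eq_nil hperm.symm
          rw [loopA, dif_neg (by simp [hl]), if_pos (by simp [hl]), loopB]
      | [a] =>
          have hl : hToList h = [a] := List.perm_singleton.mp hperm.symm
          have hsz : hSize h = 1 := by rw [← length_hToList, hl]; rfl
          rw [loopA, dif_neg (by simp [hsz]), loopB]
          by_cases hk : k ≤ a
          · rw [if_pos (by simp [hl]; omega), if_pos hk]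
          · rw [if_neg (by simp [hl]; omega), if_neg hk]
      | a :: b :: t =>
          obtain ⟨v, l, r, rfl⟩ : ∃ v l r, h = PvHeap.node v l r := by
            cases h with
            | nil => exfalso; have := hperm.length_eq; simp [hToList] at this
            | node v l r => exact ⟨v, l, r, rfl⟩
          -- the root is the minimum, and equals the sorted head a
          have hva : v = a := by
            have hmem_a : a ∈ hToList (PvHeap.node v l r) := hperm.subset (by simp)
            have hmem_v : v ∈ a :: b :: t := hperm.mem_iff.mpr (by simp [hToList])
            have h1 : v ≤ a := isHeap_root_le v l r hh a hmem_a
            have h2 : a ≤ v := by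
              rcases List.mem_cons.mp hmem_v with rfl | hv
              · exact le_refl v
              · exact (List.pairwise_cons.mp hsort).1 v hv
            omega
          subst hva
          -- first pop
          have hperm1 : (b :: t).Perm (hToList (hMerge l r)) := by
            have := hperm
            simp only [hToList] at this
            exact (this.cons_inv).trans (perm_hToList_merge l r).symm
          have hh1 : IsHeap (hMerge l r) := isHeap_merge l r hh.2.2.1 hh.2.2.2
          obtain ⟨w, l', r', hm1⟩ : ∃ w l' r', hMerge l r = PvHeap.node w l' r' := by
            cases hm : hMerge l r with
            | nil => exfalso; have := hperm1.length_eq; simp [hm, hToList] at this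
            | node w l' r' => exact ⟨w, l', r', rfl⟩
          have hsort1 : (b :: t).Pairwise (· ≤ ·) := (List.pairwise_cons.mp hsort).2
          have hwb : w = b := by
            have hmem_b : b ∈ hToList (hMerge l r) := hperm1.subset (by simp)
            have hmem_w : w ∈ b :: t := hperm1.mem_iff.mpr (by simp [hm1, hToList])
            have h1 : w ≤ b := by
              have hb' := hmem_b
              have hh1' := hh1
              rw [hm1] at hb' hh1'
              exact isHeap_root_le w l' r' hh1' b hb'
            have h2 : b ≤ w := by
              rcases List.mem_cons.mp hmem_w with rfl | hv
              · exact le_refl w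
              · exact (List.pairwise_cons.mp hsort1).1 w hv
            omega
          -- second pop
          have hperm2 : t.Perm (hToList (hMerge l' r')) := by
            have := hperm1
            rw [hm1] at this
            simp only [hToList] at this
            rw [hwb] at this
            exact (this.cons_inv).trans (perm_hToList_merge l' r').symm
          have hh2 : IsHeap (hMerge l' r') := by
            rw [hm1] at hh1
            exact isHeap_merge l' r' hh1.2.2.1 hh1.2.2.2
          have hszh : hSize (PvHeap.node v l r) = t.length + 2 := by
            rw [← length_hToList, ← hperm.length_eq]; simp
          by_cases hak : v < k
          · -- both loops step
            have hcT : ((hToList (PvHeap.node v l r)).any (fun c => decide (c < k)) &&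
                decide (1 < hSize (PvHeap.node v l r))) = true := by
              simp only [Bool.and_eq_true, List.any_eq_true, decide_eq_true_eq]
              exact ⟨⟨v, by simp [hToList], hak⟩, by omega⟩
            rw [loopA, dif_pos hcT, loopB, if_pos hak]
            simp only [hPop, hm1]
            have harith : v + w * 2 = v + 2 * b := by omega
            rw [harith]
            apply ih
            · have : hSize (hMerge l' r') = t.length := by
                rw [← length_hToList, ← hperm2.length_eq]
              simp only [hPush, hSize_merge, hSize, this]
              omega
            · exact isHeap_push _ _ hh2
            · exact (perm_insB _ t).trans (((hperm2).cons _).trans (perm_push _ _).symm)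
            · exact pairwise_insB _ t (List.pairwise_cons.mp hsort1).2
          · -- both loops stop with res
            have hall : ∀ z ∈ hToList (PvHeap.node v l r), k ≤ z := by
              intro z hz
              have hzs : z ∈ v :: b :: t := hperm.mem_iff.mpr hz
              have hvz : v ≤ z := isHeap_root_le v l r hh z hz
              omega
            rw [loopA, dif_neg (by simp only [Bool.and_eq_true, List.any_eq_true,
                  decide_eq_true_eq, not_and]; intro ⟨z, hz, hzk⟩; exact absurd (hall z hz) (by omega)),
                if_pos (by simp only [List.all_eq_true, decide_eq_true_eq]; exact hall),
                loopB, if_neg hak]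

-- ===== VERDICT (by name: the statement is the Claim_ definition above) =====
theorem JesseAndCookies_spec : Claim_equal_JesseAndCookies := by
  intro n k cookies _
  unfold Spec_JesseAndCookies JesseAndCookies JesseAndCookies_alt
  obtain ⟨hh, hp⟩ := hHeapify_spec cookies
  exact (loop_eq k (hSize (hHeapify cookies)) _ _ 0 le_rfl hh
    ((PySem.List.sorted_perm cookies (fun x => x) false).trans hp.symm)
    (by simpa using PySem.List.sorted_pairwise cookies (fun x => x)))
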